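-- pv_equiv track=rewrite | github.com/japcio/python | kropek v2.py | declare_empty_table
-- ===== SOURCE A (Python) =====
-- def declare_empty_table(window_size):
--     snake_board=[]
--     for i in range (0,window_size):
--        snake_board.append([])
--        for j in range(0, window_size):
--            snake_board[i].append(" ")
--
--     #write border in table
--     for i in range(0,window_size):
--         snake_board[0][i]="_"
--         snake_board[window_size-1][i]="-"
--     for i in range (1,window_size-1):
--         snake_board[i][0]="|"
--         snake_board[i][window_size-1]="|"
--     return snake_board
-- ===== SOURCE B (Python) =====
-- def declare_empty_table(window_size):
--     last = window_size - 1
--     return [["-" if i == last else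
--              "_" if i == 0 else
--              "|" if j == 0 or j == last else
--              " "
--              for j in range(window_size)]
--             for i in range(window_size)]
-- ===== Notes on version B (the rewrite author's own statement) =====
-- stated objective: simpler
-- what changed: Replaces A's two-phase fill-with-spaces-then-overwrite-borders construction with a single per-cell decision (bottom row checked first so n=1 yields '-', matching A's bottom-overwrites-top order).
import Mathlib
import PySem

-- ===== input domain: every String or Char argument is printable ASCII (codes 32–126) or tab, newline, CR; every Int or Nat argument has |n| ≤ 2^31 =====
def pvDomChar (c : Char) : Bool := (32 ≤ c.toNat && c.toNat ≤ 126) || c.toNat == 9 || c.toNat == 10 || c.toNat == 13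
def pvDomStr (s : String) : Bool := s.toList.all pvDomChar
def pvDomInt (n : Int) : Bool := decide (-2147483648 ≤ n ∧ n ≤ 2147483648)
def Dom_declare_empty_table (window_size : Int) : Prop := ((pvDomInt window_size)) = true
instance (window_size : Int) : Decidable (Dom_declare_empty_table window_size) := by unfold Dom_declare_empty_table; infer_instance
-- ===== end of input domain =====

-- B builds each cell directly from its position in one nested comprehension instead of
-- A's fill-with-spaces-then-overwrite-borders two-phase construction (objective: simpler).

-- ===== PORT A =====
def declare_empty_table (window_size : Int) : List (List String) :=
  -- for i in range(0, window_size): append a fresh row; for j: append " " to it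
  let board :=
    (PySem.List.pyRange 0 window_size 1).foldl
      (fun b _ =>
        b ++ [(PySem.List.pyRange 0 window_size 1).foldl (fun r _ => r ++ [" "]) []]) []
  -- for i in range(0, window_size): snake_board[0][i]="_"; snake_board[window_size-1][i]="-"
  let board :=
    (PySem.List.pyRange 0 window_size 1).foldl
      (fun b i =>
        let b1 := PySem.List.pySetD b 0
          (PySem.List.pySetD (PySem.List.pyGetD b 0 []) i "_")
        PySem.List.pySetD b1 (window_size - 1)
          (PySem.List.pySetD (PySem.List.pyGetD b1 (window_size - 1) []) i "-")) board
  -- for i in range(1, window_size-1): snake_board[i][0]="|"; snake_board[i][window_size-1]="|"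
  (PySem.List.pyRange 1 (window_size - 1) 1).foldl
    (fun b i =>
      let b1 := PySem.List.pySetD b i
        (PySem.List.pySetD (PySem.List.pyGetD b i []) 0 "|")
      PySem.List.pySetD b1 i
        (PySem.List.pySetD (PySem.List.pyGetD b1 i []) (window_size - 1) "|")) board

-- ===== PORT B =====
def declare_empty_table_alt (window_size : Int) : List (List String) :=
  let last := window_size - 1
  (PySem.List.pyRange 0 window_size 1).map (fun i =>
    (PySem.List.pyRange 0 window_size 1).map (fun j =>
      if i = last then "-"
      else if i = 0 then "_"
      else if j = 0 ∨ j = last then "|"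
      else " "))

-- ===== PRECONDITION & SPEC =====
def Spec_declare_empty_table (window_size : Int) (out : List (List String)) : Prop := out = declare_empty_table_alt window_size
instance (window_size : Int) (out : List (List String)) : Decidable (Spec_declare_empty_table window_size out) := by unfold Spec_declare_empty_table; infer_instance

-- ===== CLAIM (what is proved, stated in full; the proofs are below) =====
def Claim_equal_declare_empty_table : Prop := ∀ (window_size : Int), Dom_declare_empty_table window_size → Spec_declare_empty_table window_size (declare_empty_table window_size)

-- ===== LEMMAS AND PROOFS =====

-- B's per-cell conditional, named for the proofs
def pvCell (window_size i j : Int) : String :=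
  if i = window_size - 1 then "-"
  else if i = 0 then "_"
  else if j = 0 ∨ j = window_size - 1 then "|"
  else " "

-- closed forms for A's intermediate boards
def pvSp (m : Nat) : List String := List.replicate m " "
def pvTop (m a : Nat) : List String := List.replicate a "_" ++ List.replicate (m - a) " "
def pvBot (m a : Nat) : List String := List.replicate a "-" ++ List.replicate (m - a) " "
def pvB2 (m a : Nat) : List (List String) :=
  ((List.replicate m (pvSp m)).set 0 (pvTop m a)).set (m - 1) (pvBot m a)
def pvSide (m : Nat) : List String := "|" :: List.replicate (m - 2) " " ++ ["|"]

theorem pv_len_pvB2 (m a : Nat) : (pvB2 m a).length = m := by simp [pvB2]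

-- painting one more border cell in a partially painted row
theorem pv_set_rep (v w : String) (a m : Nat) (h : a < m) :
    (List.replicate a v ++ List.replicate (m - a) w).set a v
      = List.replicate (a + 1) v ++ List.replicate (m - (a + 1)) w := by
  have hma : m - a = (m - (a + 1)) + 1 := by omega
  rw [hma, List.replicate_succ, List.set_append]
  simp [List.replicate_succ' (n := a)]

theorem pv_take_set {α : Type} (b : List α) (i : Nat) (h : i < b.length) (v : α) :
    (b.set i v).take (i + 1) = b.take i ++ [v] := by
  apply List.ext_getElem
  · simp
    omega
  · intro k h1 h2
    simp only [List.length_take, List.length_set] at h1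
    rw [List.getElem_take, List.getElem_set]
    by_cases hk : k = i
    · subst hk
      rw [if_pos rfl, List.getElem_append_right (by simp)]
      simp [Nat.min_eq_left h.le]
    · have hk' : k < i := by omega
      rw [if_neg (by omega), List.getElem_append_left (by rw [List.length_take]; omega),
        List.getElem_take]

-- phase-1 loop: board of spaces
theorem pv_ph1 (n : Int) :
    (PySem.List.pyRange 0 n 1).foldl
      (fun b _ =>
        b ++ [(PySem.List.pyRange 0 n 1).foldl (fun r _ => r ++ [" "]) []]) []
      = List.replicate n.toNat (pvSp n.toNat) := by
  rw [show (fun (b : List (List String)) (_ : Int) =>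
        b ++ [(PySem.List.pyRange 0 n 1).foldl (fun r _ => r ++ [" "]) []])
      = fun b i => b ++ [(fun _ : Int => (PySem.List.pyRange 0 n 1).foldl (fun r _ => r ++ [" "]) []) i]
      from rfl]
  rw [PySem.List.foldl_append_singleton_eq_map]
  rw [show (fun (r : List String) (_ : Int) => r ++ [" "])
      = fun r i => r ++ [(fun _ : Int => " ") i] from rfl]
  rw [PySem.List.foldl_append_singleton_eq_map]
  simp [List.map_const', PySem.List.length_pyRange_one, pvSp]

-- phase-2 loop invariant
theorem pv_ph2 (n : Int) (hn : 2 ≤ n) :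
    ∀ (k : Nat) (a : Int), 0 ≤ a → a + k = n →
    (PySem.List.pyRange a n 1).foldl
      (fun b i =>
        let b1 := PySem.List.pySetD b 0
          (PySem.List.pySetD (PySem.List.pyGetD b 0 []) i "_")
        PySem.List.pySetD b1 (n - 1)
          (PySem.List.pySetD (PySem.List.pyGetD b1 (n - 1) []) i "-"))
      (pvB2 n.toNat a.toNat)
      = pvB2 n.toNat n.toNat := by
  intro k
  induction k with
  | zero =>
    intro a ha hak
    have : a = n := by omega
    subst this
    rw [PySem.List.pyRange_one_eq_nil (le_refl a)]
    rfl
  | succ k ih =>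
    intro a ha hak
    have han : a < n := by omega
    have hm2 : 2 ≤ n.toNat := by omega
    have haN : a.toNat < n.toNat := by omega
    rw [PySem.List.pyRange_one_cons han, List.foldl_cons]
    have hstep :
        (fun b i =>
          let b1 := PySem.List.pySetD b 0
            (PySem.List.pySetD (PySem.List.pyGetD b 0 []) i "_")
          PySem.List.pySetD b1 (n - 1)
            (PySem.List.pySetD (PySem.List.pyGetD b1 (n - 1) []) i "-"))
          (pvB2 n.toNat a.toNat) a = pvB2 n.toNat (a.toNat + 1) := by
      show
        PySem.List.pySetD
          (PySem.List.pySetD (pvB2 n.toNat a.toNat) 0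
            (PySem.List.pySetD (PySem.List.pyGetD (pvB2 n.toNat a.toNat) 0 []) a "_"))
          (n - 1)
          (PySem.List.pySetD
            (PySem.List.pyGetD
              (PySem.List.pySetD (pvB2 n.toNat a.toNat) 0
                (PySem.List.pySetD (PySem.List.pyGetD (pvB2 n.toNat a.toNat) 0 []) a "_"))
              (n - 1) []) a "-")
          = pvB2 n.toNat (a.toNat + 1)
      have hget0 : PySem.List.pyGetD (pvB2 n.toNat a.toNat) 0 [] = pvTop n.toNat a.toNat := by
        rw [PySem.List.pyGetD_zero]
        unfold pvB2
        rw [List.getD_eq_getElem?_getD, List.getElem?_set_ne (by omega),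
          List.getElem?_set_self (by simp; omega)]
        rfl
      have hrow0 : PySem.List.pySetD (pvTop n.toNat a.toNat) a "_"
          = pvTop n.toNat (a.toNat + 1) := by
        rw [PySem.List.pySetD_of_nonneg _ _ ha]
        exact pv_set_rep _ _ _ _ haN
      rw [hget0, hrow0]
      rw [PySem.List.pySetD_of_nonneg _ _ (by omega : (0:Int) ≤ 0)]
      have hgetl :
          PySem.List.pyGetD
            ((pvB2 n.toNat a.toNat).set (0:Int).toNat (pvTop n.toNat (a.toNat + 1))) (n - 1) []
            = pvBot n.toNat a.toNat := by
        rw [PySem.List.pyGetD_of_nonneg _ _ (by omega)]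
        have htn : (n - 1).toNat = n.toNat - 1 := by omega
        rw [htn]
        rw [List.getD_eq_getElem?_getD]
        rw [show (0:Int).toNat = 0 from rfl, List.getElem?_set_ne (by omega)]
        unfold pvB2
        rw [List.getElem?_set_self (by simp; omega)]
        rfl
      rw [hgetl]
      have hrowl : PySem.List.pySetD (pvBot n.toNat a.toNat) a "-"
          = pvBot n.toNat (a.toNat + 1) := by
        rw [PySem.List.pySetD_of_nonneg _ _ ha]
        exact pv_set_rep _ _ _ _ haN
      rw [hrowl]
      rw [PySem.List.pySetD_of_nonneg _ _ (by omega : (0:Int) ≤ n - 1)]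
      have htn : (n - 1).toNat = n.toNat - 1 := by omega
      rw [htn]
      show ((pvB2 n.toNat a.toNat).set 0 (pvTop n.toNat (a.toNat + 1))).set (n.toNat - 1)
          (pvBot n.toNat (a.toNat + 1)) = pvB2 n.toNat (a.toNat + 1)
      unfold pvB2
      rw [List.set_comm _ _ (by omega : n.toNat - 1 ≠ 0), List.set_set, List.set_set]
    have h1 : (a + 1).toNat = a.toNat + 1 := by omega
    have hih := ih (a + 1) (by omega) (by omega)
    rw [h1] at hih
    rw [← hih]
    congr 1

-- phase-3 loop: setting row i to f(row i) for i in an index range is a map on a sublist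
theorem pv_ph3 (n : Int) :
    ∀ (k : Nat) (a : Int) (b : List (List String)), 0 ≤ a → a.toNat + k ≤ b.length →
    (PySem.List.pyRange a (a + k) 1).foldl
      (fun b i =>
        let b1 := PySem.List.pySetD b i
          (PySem.List.pySetD (PySem.List.pyGetD b i []) 0 "|")
        PySem.List.pySetD b1 i
          (PySem.List.pySetD (PySem.List.pyGetD b1 i []) (n - 1) "|")) b
      = b.take a.toNat
        ++ ((b.drop a.toNat).take k).map
            (fun r => PySem.List.pySetD (PySem.List.pySetD r 0 "|") (n - 1) "|")
        ++ b.drop (a.toNat + k) := by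
  intro k
  induction k with
  | zero =>
    intro a b ha hlen
    rw [show a + ((0:Nat):Int) = a by simp, PySem.List.pyRange_one_eq_nil (le_refl a)]
    simp
  | succ k ih =>
    intro a b ha hlen
    have haN : a.toNat < b.length := by omega
    have han : a < a + ((k + 1 : Nat) : Int) := by push_cast; omega
    rw [PySem.List.pyRange_one_cons han, List.foldl_cons]
    have hgeta : PySem.List.pyGetD b a [] = b[a.toNat] := by
      rw [PySem.List.pyGetD_of_nonneg _ _ ha, List.getD_eq_getElem?_getD,
        List.getElem?_eq_getElem haN]
      rfl
    have hstep :
        (fun b i =>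
          let b1 := PySem.List.pySetD b i
            (PySem.List.pySetD (PySem.List.pyGetD b i []) 0 "|")
          PySem.List.pySetD b1 i
            (PySem.List.pySetD (PySem.List.pyGetD b1 i []) (n - 1) "|")) b a
          = b.set a.toNat
              (PySem.List.pySetD (PySem.List.pySetD b[a.toNat] 0 "|") (n - 1) "|") := by
      simp only [hgeta, PySem.List.pySetD_of_nonneg _ _ ha, PySem.List.pyGetD_of_nonneg _ _ ha,
        List.getD_eq_getElem?_getD, List.getElem?_set_self haN, Option.getD_some, List.set_set]
    have harw : a + ((k + 1 : Nat) : Int) = (a + 1) + ((k : Nat) : Int) := by push_cast; ring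
    rw [harw]
    have h1 : (a + 1).toNat = a.toNat + 1 := by omega
    have hih := ih (a + 1)
      (b.set a.toNat (PySem.List.pySetD (PySem.List.pySetD b[a.toNat] 0 "|") (n - 1) "|"))
      (by omega) (by rw [h1]; simp; omega)
    rw [h1] at hih
    refine (congrArg (fun z => List.foldl _ z _) hstep).trans ?_
    rw [hih]
    rw [List.drop_set_of_lt (by omega), List.drop_set_of_lt (by omega),
      pv_take_set b a.toNat haN _]
    rw [List.drop_eq_getElem_cons haN, List.take_succ_cons, List.map_cons,
      show a.toNat + (k + 1) = a.toNat + 1 + k by omega]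
    simp [List.append_assoc]

theorem pv_B2_start (m : Nat) : List.replicate m (pvSp m) = pvB2 m 0 := by
  simp [pvB2, pvTop, pvBot, pvSp, List.set_replicate_self]

theorem pv_B2_explicit (m : Nat) (hm : 2 ≤ m) :
    pvB2 m m = pvTop m m :: (List.replicate (m - 2) (pvSp m) ++ [pvBot m m]) := by
  rw [pvB2]
  rw [show List.replicate m (pvSp m)
      = pvSp m :: (List.replicate (m - 2) (pvSp m) ++ [pvSp m]) by
    rw [← List.replicate_succ', ← List.replicate_succ]
    congr 1
    omega]
  rw [List.set_cons_zero]
  rw [show m - 1 = (List.replicate (m - 2) (pvSp m)).length + 1 by simp; omega]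
  simp

-- the painted side row
theorem pv_side_row (n : Int) (hn : 2 ≤ n) :
    PySem.List.pySetD (PySem.List.pySetD (pvSp n.toNat) 0 "|") (n - 1) "|" = pvSide n.toNat := by
  have hm : 2 ≤ n.toNat := by omega
  rw [PySem.List.pySetD_of_nonneg _ _ (by omega : (0:Int) ≤ 0)]
  rw [show pvSp n.toNat = " " :: (List.replicate (n.toNat - 2) " " ++ [" "]) by
    rw [pvSp, ← List.replicate_succ', ← List.replicate_succ]
    congr 1
    omega]
  rw [show (0:Int).toNat = 0 from rfl, List.set_cons_zero]
  rw [PySem.List.pySetD_of_nonneg _ _ (by omega : (0:Int) ≤ n - 1)]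
  rw [show (n - 1).toNat = (List.replicate (n.toNat - 2) " ").length + 1 by simp; omega]
  simp [pvSide]

-- closed form of A for 2 ≤ n
theorem pv_A_closed (n : Int) (hn : 2 ≤ n) :
    declare_empty_table n
      = List.replicate n.toNat "_"
        :: (List.replicate (n.toNat - 2) (pvSide n.toNat) ++ [List.replicate n.toNat "-"]) := by
  have hm : 2 ≤ n.toNat := by omega
  have h2 := pv_ph2 n hn n.toNat 0 (by omega) (by omega)
  rw [show ((0:Int).toNat) = 0 from rfl] at h2
  have h3 := pv_ph3 n (n.toNat - 2) 1 (pvB2 n.toNat n.toNat) (by omega)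
    (by rw [pv_len_pvB2]; omega)
  rw [show (1 : Int) + ((n.toNat - 2 : Nat) : Int) = n - 1 by omega,
    show ((1:Int).toNat) = 1 from rfl] at h3
  show (PySem.List.pyRange 1 (n - 1) 1).foldl _ _ = _
  rw [pv_ph1, pv_B2_start, h2, h3, pv_B2_explicit _ hm]
  rw [show (1:Nat) + (n.toNat - 2) = (n.toNat - 2) + 1 by omega]
  simp only [List.take_succ_cons, List.take_zero, List.drop_succ_cons, List.drop_zero]
  rw [List.take_left' (by simp), List.drop_left' (by simp), List.map_replicate, pv_side_row n hn]
  simp [pvTop, pvBot]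

-- splitting range(0, n) into first, middle, last
theorem pv_range_split (n : Int) (hn : 2 ≤ n) :
    PySem.List.pyRange 0 n 1 = 0 :: (PySem.List.pyRange 1 (n - 1) 1 ++ [n - 1]) := by
  rw [PySem.List.pyRange_one_cons (by omega : (0:Int) < n)]
  congr 1
  have h := PySem.List.pyRange_one_succ_right (a := 1) (b := n - 1) (by omega)
  rw [sub_add_cancel] at h
  exact h

-- closed form of B for 2 ≤ n
theorem pv_B_closed (n : Int) (hn : 2 ≤ n) :
    declare_empty_table_alt n
      = List.replicate n.toNat "_"
        :: (List.replicate (n.toNat - 2) (pvSide n.toNat) ++ [List.replicate n.toNat "-"]) := by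
  have hm : 2 ≤ n.toNat := by omega
  have hlen : (PySem.List.pyRange 0 n 1).length = n.toNat := by
    rw [PySem.List.length_pyRange_one]; congr 1; omega
  have hlenmid : (PySem.List.pyRange 1 (n - 1) 1).length = n.toNat - 2 := by
    rw [PySem.List.length_pyRange_one]; omega
  have hrow : ∀ i ∈ PySem.List.pyRange 1 (n - 1) 1,
      (PySem.List.pyRange 0 n 1).map (fun j => pvCell n i j) = pvSide n.toNat := by
    intro i hi
    rw [PySem.List.mem_pyRange_one] at hi
    obtain ⟨hi1, hi2⟩ := hi
    rw [pv_range_split n hn, List.map_cons, List.map_append, List.map_singleton]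
    rw [show pvCell n i 0 = "|" by
      simp [pvCell, show i ≠ n - 1 by omega, show i ≠ 0 by omega]]
    rw [show pvCell n i (n - 1) = "|" by
      simp [pvCell, show i ≠ n - 1 by omega, show i ≠ 0 by omega]]
    rw [(List.map_congr_left (fun j hj => by
      have hj' := PySem.List.mem_pyRange_one.mp hj
      show pvCell n i j = " "
      simp [pvCell, show i ≠ n - 1 by omega, show i ≠ 0 by omega,
        show j ≠ 0 by omega, show j ≠ n - 1 by omega]) :
      (PySem.List.pyRange 1 (n - 1) 1).map (fun j => pvCell n i j)
        = (PySem.List.pyRange 1 (n - 1) 1).map (fun _ => " "))]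
    rw [List.map_const', hlenmid]
    rfl
  have hrow0 : (PySem.List.pyRange 0 n 1).map (fun j => pvCell n 0 j)
      = List.replicate n.toNat "_" := by
    rw [(List.map_congr_left (fun j _ => by
      show pvCell n 0 j = "_"
      simp [pvCell, show (0:Int) ≠ n - 1 by omega]) :
      (PySem.List.pyRange 0 n 1).map (fun j => pvCell n 0 j)
        = (PySem.List.pyRange 0 n 1).map (fun _ => "_"))]
    rw [List.map_const', hlen]
  have hrowl : (PySem.List.pyRange 0 n 1).map (fun j => pvCell n (n - 1) j)
      = List.replicate n.toNat "-" := by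
    rw [(List.map_congr_left (fun j _ => by
      show pvCell n (n - 1) j = "-"
      simp [pvCell]) :
      (PySem.List.pyRange 0 n 1).map (fun j => pvCell n (n - 1) j)
        = (PySem.List.pyRange 0 n 1).map (fun _ => "-"))]
    rw [List.map_const', hlen]
  show (PySem.List.pyRange 0 n 1).map (fun i =>
      (PySem.List.pyRange 0 n 1).map (fun j => pvCell n i j)) = _
  rw [congrArg (fun l => l.map (fun i =>
      (PySem.List.pyRange 0 n 1).map (fun j => pvCell n i j))) (pv_range_split n hn)]
  rw [List.map_cons, List.map_append, List.map_singleton]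
  rw [hrow0, hrowl,
    (List.map_congr_left hrow :
      (PySem.List.pyRange 1 (n - 1) 1).map (fun i =>
        (PySem.List.pyRange 0 n 1).map (fun j => pvCell n i j))
        = (PySem.List.pyRange 1 (n - 1) 1).map (fun _ => pvSide n.toNat)),
    List.map_const', hlenmid]

-- ===== VERDICT (by name: the statement is the Claim_ definition above) =====
theorem declare_empty_table_spec : Claim_equal_declare_empty_table := by
  intro n _
  show declare_empty_table n = declare_empty_table_alt n
  by_cases hle : n ≤ 0
  · show (PySem.List.pyRange 1 (n - 1) 1).foldl _ _ = (PySem.List.pyRange 0 n 1).map _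
    rw [PySem.List.pyRange_one_eq_nil (by omega : n ≤ (0:Int)),
      PySem.List.pyRange_one_eq_nil (by omega : n - 1 ≤ (1:Int))]
    rfl
  · by_cases h1 : n = 1
    · subst h1; decide
    · have hn : 2 ≤ n := by omega
      rw [pv_A_closed n hn, pv_B_closed n hn]
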